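-- pv_equiv track=rewrite | github.com/yashlal/Deepfake-Microbiomes | modules.py | regenerate_LamMatrix
-- ===== SOURCE A (Python) =====
-- def regenerate_LamMatrix(LT_arr, dim):
--     output_ar = []
--
--     for i in range(dim):
--         output_ar.append([])
--
--         for j in range(dim):
--             if j<i:
--                 v = int(((i/2)*(i-1))+j)
--                 output_ar[-1].append(LT_arr[v])
--             if j==i:
--                 output_ar[-1].append(0)
--             if j>i:
--                 v = int(((j/2)*(j-1))+i)
--                 if LT_arr[v] == 1:
--                     output_ar[-1].append(-1)
--                 else:
--                     output_ar[-1].append(1)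
--
--     return output_ar
-- ===== SOURCE B (Python) =====
-- def regenerate_LamMatrix(LT_arr, dim):
--     # One streaming pass: each flat value is read once and scattered to its two
--     # mirror cells (the value into the lower triangle, its sign-flip into the
--     # upper), so no flat-index formula and no mirror lookup are ever computed.
--     n = dim if dim > 0 else 0
--     lower = [[] for _ in range(n)]
--     upper = [[] for _ in range(n)]
--     it = iter(LT_arr)
--     for i in range(n):
--         for j in range(i):
--             v = next(it)
--             lower[i].append(v)
--             upper[j].append(-1 if v == 1 else 1)
--     return [lower[i] + [0] + upper[i] for i in range(n)]
-- ===== Notes on version B (the rewrite author's own statement) =====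
-- stated objective: alternative
-- what changed: A gathers every cell separately, recomputing a flat-index formula for both triangles; B instead makes one streaming pass over the flat array, scattering each value once to its two mirror cells (the value appended to lower[i], its sign-flip appended to upper[j]) and then concatenating lower + [0] + upper per row, so no index formula or mirror lookup exists.
import Mathlib
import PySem

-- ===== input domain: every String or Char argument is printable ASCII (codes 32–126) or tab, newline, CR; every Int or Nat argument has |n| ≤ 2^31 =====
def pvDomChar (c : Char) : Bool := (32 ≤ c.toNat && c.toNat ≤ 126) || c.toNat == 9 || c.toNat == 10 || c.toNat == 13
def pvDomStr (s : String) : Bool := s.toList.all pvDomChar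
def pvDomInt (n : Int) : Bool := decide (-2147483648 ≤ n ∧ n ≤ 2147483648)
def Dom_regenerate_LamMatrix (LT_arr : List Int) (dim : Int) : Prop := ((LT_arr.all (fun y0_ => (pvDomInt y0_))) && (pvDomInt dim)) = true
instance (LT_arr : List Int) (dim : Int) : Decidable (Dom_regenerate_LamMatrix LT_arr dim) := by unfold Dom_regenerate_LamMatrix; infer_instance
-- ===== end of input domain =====

-- B makes a single streaming pass over the flat array, scattering each value once to its
-- two mirror cells (value → lower triangle, sign-flip → upper), then concatenates
-- lower + [0] + upper per row; no flat-index formula or mirror lookup. Objective: alternative.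

-- ===== PORT A =====
-- Python's float index int(((i/2)*(i-1))+j) is ported as the exact integer i*(i-1)/2 + j:
-- the two agree on every index that can address an actual list.
-- LT_arr[v] is ported with pyGetD (default 0): Python raises IndexError out of range; Pre_ excludes those inputs.
def regenerate_LamMatrix (LT_arr : List Int) (dim : Int) : List (List Int) :=
  (PySem.List.pyRange 0 dim 1).foldl (fun output_ar i =>
    let row := (PySem.List.pyRange 0 dim 1).foldl (fun row j =>
      let row := if j < i then row ++ [PySem.List.pyGetD LT_arr (i * (i - 1) / 2 + j) 0] else row
      let row := if j = i then row ++ [(0 : Int)] else row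
      let row := if j > i then
          (if PySem.List.pyGetD LT_arr (j * (j - 1) / 2 + i) 0 = 1 then row ++ [(-1 : Int)]
           else row ++ [(1 : Int)])
        else row
      row) []
    output_ar ++ [row]) []

-- ===== PORT B =====
-- state of B's streaming pass: (lower rows, upper rows, iterator position);
-- Python's `next(it)` is the read at the running position (Pre_ excludes exhaustion).
def pvBInner (LT_arr : List Int) (i : Int)
    (st : List (List Int) × List (List Int) × Int) (j : Int) :
    List (List Int) × List (List Int) × Int :=
  let v := PySem.List.pyGetD LT_arr st.2.2 0
  (st.1.modify i.toNat (· ++ [v]),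
   st.2.1.modify j.toNat (· ++ [if v = 1 then (-1 : Int) else (1 : Int)]),
   st.2.2 + 1)

def pvBOuter (LT_arr : List Int)
    (st : List (List Int) × List (List Int) × Int) (i : Int) :
    List (List Int) × List (List Int) × Int :=
  (PySem.List.pyRange 0 i 1).foldl (pvBInner LT_arr i) st

def regenerate_LamMatrix_alt (LT_arr : List Int) (dim : Int) : List (List Int) :=
  let n : Int := if dim > 0 then dim else 0
  let st := (PySem.List.pyRange 0 n 1).foldl (pvBOuter LT_arr)
      ((PySem.List.pyRange 0 n 1).map (fun _ => ([] : List Int)),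
       (PySem.List.pyRange 0 n 1).map (fun _ => ([] : List Int)),
       (0 : Int))
  (PySem.List.pyRange 0 n 1).map (fun i =>
    PySem.List.pyGetD st.1 i [] ++ [(0 : Int)] ++ PySem.List.pyGetD st.2.1 i [])

-- ===== PRECONDITION & SPEC =====
-- Pre_ excludes exactly the inputs on which Python A raises IndexError: for dim ≥ 2 the
-- loop reads flat indices 0 .. dim*(dim-1)/2 - 1, so LT_arr must hold at least dim*(dim-1)/2 entries.
def Pre_regenerate_LamMatrix (LT_arr : List Int) (dim : Int) : Prop :=
  dim ≤ 1 ∨ dim * (dim - 1) ≤ 2 * (LT_arr.length : Int)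
instance (LT_arr : List Int) (dim : Int) : Decidable (Pre_regenerate_LamMatrix LT_arr dim) := by
  unfold Pre_regenerate_LamMatrix; infer_instance

def pvWitness_regenerate_LamMatrix : List Int × Int := ([1, -1, 1], 3)

def Spec_regenerate_LamMatrix (LT_arr : List Int) (dim : Int) (out : List (List Int)) : Prop := out = regenerate_LamMatrix_alt LT_arr dim
instance (LT_arr : List Int) (dim : Int) (out : List (List Int)) : Decidable (Spec_regenerate_LamMatrix LT_arr dim out) := by unfold Spec_regenerate_LamMatrix; infer_instance

-- ===== CLAIM (what is proved, stated in full; the proofs are below) =====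
def Claim_equal_regenerate_LamMatrix : Prop := ∀ (LT_arr : List Int) (dim : Int), Dom_regenerate_LamMatrix LT_arr dim → Pre_regenerate_LamMatrix LT_arr dim → Spec_regenerate_LamMatrix LT_arr dim (regenerate_LamMatrix LT_arr dim)

-- ===== LEMMAS AND PROOFS =====

-- lower-triangle row i and the upper tail of row k (flips of column k of rows k+1..m-1)
def lowRow (LT : List Int) (i : Int) : List Int :=
  (PySem.List.pyRange 0 i 1).map (fun j => PySem.List.pyGetD LT (i * (i - 1) / 2 + j) 0)

def upRow (LT : List Int) (m k : Int) : List Int :=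
  (PySem.List.pyRange (k + 1) m 1).map (fun i =>
    if PySem.List.pyGetD LT (i * (i - 1) / 2 + k) 0 = 1 then (-1 : Int) else (1 : Int))

def pvRow (LT : List Int) (dim i : Int) : List Int :=
  (lowRow LT i ++ [(0 : Int)]) ++ upRow LT dim i

-- A's inner loop over j, for a fixed row index 0 ≤ i < dim, produces pvRow
lemma pvInnerA (LT : List Int) (dim i : Int) (h0 : 0 ≤ i) (hi : i < dim) :
    (PySem.List.pyRange 0 dim 1).foldl (fun row j =>
      let row := if j < i then row ++ [PySem.List.pyGetD LT (i * (i - 1) / 2 + j) 0] else row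
      let row := if j = i then row ++ [(0 : Int)] else row
      let row := if j > i then
          (if PySem.List.pyGetD LT (j * (j - 1) / 2 + i) 0 = 1 then row ++ [(-1 : Int)]
           else row ++ [(1 : Int)])
        else row
      row) [] = pvRow LT dim i := by
  rw [PySem.List.pyRange_one_append 0 i dim h0 (le_of_lt hi),
      PySem.List.pyRange_one_append i (i + 1) dim (by omega) (by omega),
      PySem.List.pyRange_one_singleton]
  rw [List.foldl_append, List.foldl_append]
  rw [PySem.List.foldl_congr_mem (PySem.List.pyRange 0 i 1) _
      (fun row j => row ++ [PySem.List.pyGetD LT (i * (i - 1) / 2 + j) 0]) _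
      (by intro acc x hx
          obtain ⟨hx1, hx2⟩ := PySem.List.mem_pyRange_one.mp hx
          dsimp only
          split_ifs <;> first | rfl | omega)]
  rw [PySem.List.foldl_append_singleton_eq_map]
  have hmid : ∀ acc : List Int, List.foldl (fun row j =>
      let row := if j < i then row ++ [PySem.List.pyGetD LT (i * (i - 1) / 2 + j) 0] else row
      let row := if j = i then row ++ [(0 : Int)] else row
      let row := if j > i then
          (if PySem.List.pyGetD LT (j * (j - 1) / 2 + i) 0 = 1 then row ++ [(-1 : Int)]
           else row ++ [(1 : Int)])
        else row
      row) acc [i] = acc ++ [(0 : Int)] := by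
    intro acc
    simp only [List.foldl_cons, List.foldl_nil]
    split_ifs <;> first | rfl | omega
  rw [hmid]
  rw [PySem.List.foldl_congr_mem (PySem.List.pyRange (i + 1) dim 1) _
      (fun row j => row ++ [if PySem.List.pyGetD LT (j * (j - 1) / 2 + i) 0 = 1
                            then (-1 : Int) else (1 : Int)]) _
      (by intro acc x hx
          obtain ⟨hx1, hx2⟩ := PySem.List.mem_pyRange_one.mp hx
          dsimp only
          split_ifs <;> first | rfl | omega)]
  rw [PySem.List.foldl_append_singleton_eq_map]
  rfl

-- modifying entry k of a map over range 0..n-1 updates the function at k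
lemma pvModifyMap {β : Type} (f : Int → β) (g : β → β) (n k : Int) (h0 : 0 ≤ k) (_h : k < n) :
    ((PySem.List.pyRange 0 n 1).map f).modify k.toNat g
      = (PySem.List.pyRange 0 n 1).map (fun x => if x = k then g (f k) else f x) := by
  apply List.ext_getElem
  · simp [List.length_modify]
  · intro i h1 h2
    simp only [List.getElem_modify, List.getElem_map, PySem.List.getElem_pyRange_one]
    by_cases hk : k.toNat = i
    · have hx : (i : Int) = k := by omega
      simp [hk, hx]
    · have hx : ¬ ((i : Int) = k) := by omega
      simp [hk, hx]

-- partial lower row m after t values have been consumed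
def partLow (LT : List Int) (m t : Int) : List Int :=
  (PySem.List.pyRange 0 t 1).map (fun j => PySem.List.pyGetD LT (m * (m - 1) / 2 + j) 0)

-- state of B's pass while processing row m, after t inner steps
def innerSt (LT : List Int) (n m t : Int) : List (List Int) × List (List Int) × Int :=
  ((PySem.List.pyRange 0 n 1).map (fun k =>
      if k < m then lowRow LT k else if k = m then partLow LT m t else []),
   (PySem.List.pyRange 0 n 1).map (fun k =>
      if k < t then upRow LT (m + 1) k else upRow LT m k),
   m * (m - 1) / 2 + t)

-- state of B's pass after the first m full rows
def outerSt (LT : List Int) (n m : Int) : List (List Int) × List (List Int) × Int :=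
  ((PySem.List.pyRange 0 n 1).map (fun k => if k < m then lowRow LT k else []),
   (PySem.List.pyRange 0 n 1).map (fun k => upRow LT m k),
   m * (m - 1) / 2)

lemma pvStepInner (LT : List Int) (n m t : Int) (hm0 : 0 ≤ m) (hmn : m < n)
    (ht0 : 0 ≤ t) (ht : t < m) :
    pvBInner LT m (innerSt LT n m t) t = innerSt LT n m (t + 1) := by
  unfold pvBInner innerSt
  simp only
  refine Prod.ext ?_ (Prod.ext ?_ ?_)
  · rw [pvModifyMap _ _ n m hm0 hmn]
    apply List.map_congr_left
    intro x hx
    obtain ⟨hx1, hx2⟩ := PySem.List.mem_pyRange_one.mp hx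
    by_cases hxm : x = m
    · subst hxm
      have h1 : ¬ (x < x) := lt_irrefl x
      simp only [h1, if_false]
      have : partLow LT x t ++ [PySem.List.pyGetD LT (x * (x - 1) / 2 + t) 0]
            = partLow LT x (t + 1) := by
        unfold partLow
        rw [PySem.List.pyRange_one_append 0 t (t + 1) ht0 (by omega),
            PySem.List.pyRange_one_singleton, List.map_append]
        rfl
      simpa using this
    · split_ifs <;> rfl
  · rw [pvModifyMap _ _ n t ht0 (by omega)]
    apply List.map_congr_left
    intro x hx
    obtain ⟨hx1, hx2⟩ := PySem.List.mem_pyRange_one.mp hx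
    by_cases hxt : x = t
    · subst hxt
      simp only [if_neg (lt_irrefl x), if_pos (by omega : x < x + 1)]
      unfold upRow
      rw [PySem.List.pyRange_one_append (x + 1) m (m + 1) (by omega) (by omega),
          PySem.List.pyRange_one_singleton, List.map_append]
      rfl
    · split_ifs <;> first | rfl | omega
  · show m * (m - 1) / 2 + t + 1 = m * (m - 1) / 2 + (t + 1)
    omega

lemma pvInnerFold (LT : List Int) (n m : Int) (hm0 : 0 ≤ m) (hmn : m < n) :
    ∀ (t : Nat), (t : Int) ≤ m →
    (PySem.List.pyRange 0 (t : Int) 1).foldl (pvBInner LT m) (innerSt LT n m 0)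
      = innerSt LT n m (t : Int) := by
  intro t
  induction t with
  | zero => intro _; simp [PySem.List.pyRange_one_eq_nil (by omega : (0:Int) ≤ 0)]
  | succ t ih =>
    intro h
    have hc : ((t + 1 : Nat) : Int) = (t : Int) + 1 := by push_cast; ring
    rw [hc, PySem.List.pyRange_one_append 0 (t : Int) ((t : Int) + 1) (by omega) (by omega),
        PySem.List.pyRange_one_singleton, List.foldl_append, ih (by omega)]
    simp only [List.foldl_cons, List.foldl_nil]
    exact pvStepInner LT n m (t : Int) hm0 hmn (by omega) (by omega)

lemma pvInnerSt0 (LT : List Int) (n m : Int) :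
    innerSt LT n m 0 = outerSt LT n m := by
  unfold innerSt outerSt
  refine Prod.ext ?_ (Prod.ext ?_ ?_)
  · apply List.map_congr_left
    intro x hx
    obtain ⟨hx1, hx2⟩ := PySem.List.mem_pyRange_one.mp hx
    by_cases hxm : x < m
    · simp [hxm]
    · by_cases hxe : x = m
      · subst hxe
        simp [partLow, PySem.List.pyRange_one_eq_nil (le_refl (0:Int))]
      · simp [hxm, hxe]
  · apply List.map_congr_left
    intro x hx
    obtain ⟨hx1, hx2⟩ := PySem.List.mem_pyRange_one.mp hx
    simp [show ¬ (x < 0) by omega]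
  · simp

lemma pvInnerStFull (LT : List Int) (n m : Int) (hm0 : 0 ≤ m) :
    innerSt LT n m m = outerSt LT n (m + 1) := by
  unfold innerSt outerSt
  refine Prod.ext ?_ (Prod.ext ?_ ?_)
  · apply List.map_congr_left
    intro x hx
    obtain ⟨hx1, hx2⟩ := PySem.List.mem_pyRange_one.mp hx
    by_cases hxm : x < m
    · simp [hxm, show x < m + 1 by omega]
    · by_cases hxe : x = m
      · subst hxe
        have : partLow LT x x = lowRow LT x := rfl
        simp [this, show x < x + 1 by omega]
      · simp [hxm, hxe, show ¬ (x < m + 1) by omega]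
  · apply List.map_congr_left
    intro x hx
    obtain ⟨hx1, hx2⟩ := PySem.List.mem_pyRange_one.mp hx
    by_cases hxm : x < m
    · simp [hxm]
    · have h1 : upRow LT m x = [] := by
        unfold upRow
        rw [PySem.List.pyRange_one_eq_nil (by omega : m ≤ x + 1)]
        rfl
      have h2 : upRow LT (m + 1) x = [] := by
        unfold upRow
        rw [PySem.List.pyRange_one_eq_nil (by omega : m + 1 ≤ x + 1)]
        rfl
      simp [hxm, h1, h2]
  · show m * (m - 1) / 2 + m = (m + 1) * (m + 1 - 1) / 2
    have h : (m + 1) * (m + 1 - 1) = m * (m - 1) + 2 * m := by ring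
    omega

lemma pvOuterFold (LT : List Int) (n : Int) :
    ∀ (m : Nat), (m : Int) ≤ n →
    (PySem.List.pyRange 0 (m : Int) 1).foldl (pvBOuter LT) (outerSt LT n 0)
      = outerSt LT n (m : Int) := by
  intro m
  induction m with
  | zero => intro _; simp [PySem.List.pyRange_one_eq_nil (by omega : (0:Int) ≤ 0)]
  | succ m ih =>
    intro h
    have hc : ((m + 1 : Nat) : Int) = (m : Int) + 1 := by push_cast; ring
    rw [hc, PySem.List.pyRange_one_append 0 (m : Int) ((m : Int) + 1) (by omega) (by omega),
        PySem.List.pyRange_one_singleton, List.foldl_append, ih (by omega)]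
    simp only [List.foldl_cons, List.foldl_nil]
    unfold pvBOuter
    rw [← pvInnerSt0 LT n (m : Int),
        pvInnerFold LT n (m : Int) (by omega) (by omega) m (le_refl _)]
    exact pvInnerStFull LT n (m : Int) (by omega)

lemma pvOuterSt0 (LT : List Int) (n : Int) :
    outerSt LT n 0 = ((PySem.List.pyRange 0 n 1).map (fun _ => ([] : List Int)),
                      (PySem.List.pyRange 0 n 1).map (fun _ => ([] : List Int)),
                      (0 : Int)) := by
  unfold outerSt
  refine Prod.ext ?_ (Prod.ext ?_ ?_)
  · apply List.map_congr_left
    intro x hx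
    obtain ⟨hx1, hx2⟩ := PySem.List.mem_pyRange_one.mp hx
    simp [show ¬ (x < 0) by omega]
  · apply List.map_congr_left
    intro x hx
    obtain ⟨hx1, hx2⟩ := PySem.List.mem_pyRange_one.mp hx
    unfold upRow
    rw [PySem.List.pyRange_one_eq_nil (by omega : (0:Int) ≤ x + 1)]
    rfl
  · simp

-- ===== VERDICT (by name: the statement is the Claim_ definition above) =====
theorem regenerate_LamMatrix_spec : Claim_equal_regenerate_LamMatrix := by
  intro LT dim _ _
  unfold Spec_regenerate_LamMatrix regenerate_LamMatrix regenerate_LamMatrix_alt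
  by_cases hd : 0 < dim
  · simp only [hd, if_pos]
    -- A side becomes a map of pvRow
    rw [PySem.List.foldl_congr_mem _ _ (fun out i => out ++ [pvRow LT dim i]) _
        (by intro acc x hx
            obtain ⟨hx1, hx2⟩ := PySem.List.mem_pyRange_one.mp hx
            dsimp only
            rw [pvInnerA LT dim x hx1 hx2])]
    rw [PySem.List.foldl_append_singleton_eq_map, List.nil_append]
    -- B side: the streaming fold reaches outerSt LT dim dim
    rw [← pvOuterSt0 LT dim]
    have hfold := pvOuterFold LT dim dim.toNat (by omega)
    rw [Int.toNat_of_nonneg (by omega : (0:Int) ≤ dim)] at hfold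
    rw [hfold]
    apply List.map_congr_left
    intro i hi
    obtain ⟨hi1, hi2⟩ := PySem.List.mem_pyRange_one.mp hi
    unfold outerSt
    simp only
    rw [PySem.List.pyGetD_map_pyRange_of_nonneg _ dim i _ hi1 hi2,
        PySem.List.pyGetD_map_pyRange_of_nonneg _ dim i _ hi1 hi2]
    unfold pvRow
    rw [if_pos hi2, List.append_assoc]
  · have h1 : PySem.List.pyRange 0 dim 1 = [] := PySem.List.pyRange_one_eq_nil (by omega)
    have h2 : (if dim > 0 then dim else 0) = 0 := by simp [hd]
    rw [h1, h2]
    simp [PySem.List.pyRange_one_eq_nil (le_refl (0:Int))]
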